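-- pv_equiv track=rewrite | github.com/deanjlovett/hacker-rank | 20-easy-the-love-letter-mystery/tlm.py | theLoveLetterMystery_old
-- ===== SOURCE A (Python) =====
-- def theLoveLetterMystery_old(s):
--     # Write your code here
--     cl = list(s)
--
--     count = 0
--     idx_b = len(cl)-1
--
--     for idx_f in range(len(cl)):
--
--         if idx_b <= idx_f:
--             break
--
--         while   ord( cl[idx_f] ) > ord( cl[idx_b] ):
--             cl[idx_f] = chr( ord( cl[idx_f] ) -1 )
--             count += 1
--
--         while ord( cl[idx_f] ) < ord( cl[idx_b] ):
--             cl[idx_b] = chr( ord( cl[idx_b] ) -1 )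
--             count += 1
--
--         idx_b -= 1
--
--     return count
-- ===== SOURCE B (Python) =====
-- def theLoveLetterMystery_old(s):
--     n = len(s)
--     return sum(abs(ord(s[i]) - ord(s[n - 1 - i])) for i in range(n // 2))
-- ===== Notes on version B (the rewrite author's own statement) =====
-- stated objective: faster
-- what changed: Replaced the two nested unit-step decrement while-loops that mutate a char list with a single closed-form sum of |ord(s[i]) - ord(s[n-1-i])| over the first half of the string.
import Mathlib
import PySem

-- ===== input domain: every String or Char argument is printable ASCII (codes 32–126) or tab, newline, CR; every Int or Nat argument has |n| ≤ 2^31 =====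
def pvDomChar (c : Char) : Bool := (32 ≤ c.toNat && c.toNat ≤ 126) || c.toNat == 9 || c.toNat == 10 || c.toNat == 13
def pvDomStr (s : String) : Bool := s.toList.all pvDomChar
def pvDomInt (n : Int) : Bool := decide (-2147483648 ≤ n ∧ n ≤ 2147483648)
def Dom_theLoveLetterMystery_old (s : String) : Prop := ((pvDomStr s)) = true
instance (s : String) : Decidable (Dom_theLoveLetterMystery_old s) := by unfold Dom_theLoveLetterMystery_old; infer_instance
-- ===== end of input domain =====

-- B replaces A's unit-step decrement simulation with a closed-form sum of |ord differences|
-- over mirrored pairs (objective: faster, constant-factor; A does one step per decrement).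


-- ===== PORT A =====
-- A's chars are handled as their ord codes (Nat): Python stores chr(ord(c)-1) and always
-- reads back through ord, so tracking codes is exact.
-- 'while ord(cl[f]) > ord(cl[b]): cl[f] = chr(ord(cl[f])-1); count += 1'
def tlmWhileA (x y : Nat) (count : Int) : Nat × Int :=
  if y < x then tlmWhileA (x - 1) y (count + 1) else (x, count)
termination_by x
decreasing_by omega

-- the 'for idx_f in range(len(cl))' loop, with mutable cl, idx_b, count
def tlmForA (cl : List Nat) (fs : List Nat) (idx_b : Int) (count : Int) : Int :=
  match fs with
  | [] => count
  | f :: rest =>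
    if idx_b ≤ (f : Int) then count
    else
      let x := cl.getD f 0
      let y := cl.getD idx_b.toNat 0
      let p1 := tlmWhileA x y count          -- first while: decrement cl[idx_f]
      let p2 := tlmWhileA y p1.1 p1.2        -- second while: decrement cl[idx_b]
      tlmForA ((cl.set f p1.1).set idx_b.toNat p2.1) rest (idx_b - 1) p2.2

def theLoveLetterMystery_old (s : String) : Int :=
  let cl := s.toList.map Char.toNat
  tlmForA cl (List.range cl.length) ((cl.length : Int) - 1) 0

-- ===== PORT B =====
-- sum(abs(ord(s[i]) - ord(s[n-1-i])) for i in range(n//2)); indices are always in range.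
def theLoveLetterMystery_old_alt (s : String) : Int :=
  let cs := s.toList
  let n := cs.length
  (List.range (n / 2)).foldl
    (fun acc i => acc + |((cs.getD i ' ').toNat : Int) - ((cs.getD (n - 1 - i) ' ').toNat : Int)|) 0

-- ===== PRECONDITION & SPEC =====
def Spec_theLoveLetterMystery_old (s : String) (out : Int) : Prop := out = theLoveLetterMystery_old_alt s
instance (s : String) (out : Int) : Decidable (Spec_theLoveLetterMystery_old s out) := by unfold Spec_theLoveLetterMystery_old; infer_instance

-- ===== CLAIM (what is proved, stated in full; the proofs are below) =====
def Claim_equal_theLoveLetterMystery_old : Prop := ∀ (s : String), Dom_theLoveLetterMystery_old s → Spec_theLoveLetterMystery_old s (theLoveLetterMystery_old s)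

-- ===== LEMMAS AND PROOFS =====

-- the first while loop ends at min x y, having added x - min x y steps
theorem tlmWhileA_spec (x y : Nat) (count : Int) :
    tlmWhileA x y count = (min x y, count + ((x : Int) - (min x y : Nat))) := by
  induction x generalizing count with
  | zero => rw [tlmWhileA]; simp
  | succ n ih =>
      rw [tlmWhileA]
      by_cases h : y < n + 1
      · simp only [if_pos h]
        simp only [Nat.add_sub_cancel]
        rw [ih]
        have h1 : min n y = y := by omega
        have h2 : min (n + 1) y = y := by omega
        rw [h1, h2]
        refine Prod.ext rfl ?_
        push_cast
        omega
      · simp only [if_neg h]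
        have : min (n + 1) y = n + 1 := by omega
        rw [this]
        simp

theorem getD_set_ne (l : List Nat) (i j : Nat) (x : Nat) (h : i ≠ j) :
    (l.set i x).getD j 0 = l.getD j 0 := by
  simp [List.getD_eq_getElem?_getD, List.getElem?_set_ne h]

-- the remaining pure sum from pair index f onwards
def tlmSum (s0 : List Nat) (f : Nat) : Int :=
  ((List.range' f (s0.length / 2 - f)).map
    (fun i => |(s0.getD i 0 : Int) - (s0.getD (s0.length - 1 - i) 0 : Int)|)).sum

theorem tlmForA_spec (s0 : List Nat) :
    ∀ (m f : Nat) (cl : List Nat) (c : Int),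
      cl.length = s0.length → f + m = s0.length →
      (∀ i, f ≤ i → i < s0.length - f → cl.getD i 0 = s0.getD i 0) →
      tlmForA cl (List.range' f m) ((s0.length : Int) - 1 - f) c = c + tlmSum s0 f := by
  intro m
  induction m with
  | zero =>
      intro f cl c _ hfm _
      have : s0.length / 2 - f = 0 := by omega
      simp [tlmForA, tlmSum, this]
  | succ m ih =>
      intro f cl c hlen hfm hagree
      have hn := hfm
      rw [List.range'_succ, tlmForA]
      by_cases hb : ((s0.length : Int) - 1 - f ≤ (f : Int))
      · have h2 : s0.length / 2 - f = 0 := by omega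
        rw [if_pos hb]
        simp [tlmSum, h2]
      · simp only [if_neg hb]
        have hflt : f < s0.length - 1 - f := by omega
        have hbt : ((s0.length : Int) - 1 - f).toNat = s0.length - 1 - f := by omega
        set b := s0.length - 1 - f with hbdef
        have hx : cl.getD f 0 = s0.getD f 0 := hagree f (le_refl f) (by omega)
        have hy : cl.getD (((s0.length : Int) - 1 - f).toNat) 0 = s0.getD b 0 := by
          rw [hbt]; exact hagree b (by omega) (by omega)
        rw [hx, hy, tlmWhileA_spec, tlmWhileA_spec]
        set X := s0.getD f 0
        set Y := s0.getD b 0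
        have hmin : min Y (min X Y) = min X Y := by omega
        simp only [hmin]
        have harg : ∀ i, f + 1 ≤ i → i < s0.length - (f + 1) →
            (((cl.set f (min X Y)).set ((s0.length : Int) - 1 - (f : Nat)).toNat (min X Y))).getD i 0
              = s0.getD i 0 := by
          intro i h1 h2
          rw [getD_set_ne _ _ _ _ (by omega), getD_set_ne _ _ _ _ (by omega)]
          exact hagree i (by omega) (by omega)
        have hstep := ih (f + 1)
          ((cl.set f (min X Y)).set ((s0.length : Int) - 1 - (f : Nat)).toNat (min X Y))
          (c + ((X : Int) - (min X Y : Nat)) + ((Y : Int) - (min X Y : Nat)))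
          (by simp [hlen]) (by omega) harg
        have hb1 : (s0.length : Int) - 1 - (f : Nat) - 1 = (s0.length : Int) - 1 - ((f + 1 : Nat) : Int) := by
          push_cast; ring
        rw [hb1] at *
        rw [hstep]
        -- remaining: fold out one term of tlmSum
        have hfh : f < s0.length / 2 := by omega
        have hsplit : s0.length / 2 - f = (s0.length / 2 - (f + 1)) + 1 := by omega
        rw [tlmSum, tlmSum, hsplit, List.range'_succ, List.map_cons, List.sum_cons]
        have habs : |(X : Int) - (Y : Int)| = ((X : Int) - (min X Y : Nat)) + ((Y : Int) - (min X Y : Nat)) := by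
          rcases le_total X Y with h | h
          · have : min X Y = X := by omega
            rw [this, abs_sub_comm, abs_of_nonneg (by omega)]; ring
          · have : min X Y = Y := by omega
            rw [this, abs_of_nonneg (by omega)]; ring
        rw [← hbdef, habs]
        ring

theorem getD_map_toNat (cs : List Char) (i : Nat) (hi : i < cs.length) :
    (cs.map Char.toNat).getD i 0 = (cs.getD i ' ').toNat := by
  simp [List.getD_eq_getElem?_getD, List.getElem?_map, List.getElem?_eq_getElem hi]

-- ===== VERDICT (by name: the statement is the Claim_ definition above) =====
theorem theLoveLetterMystery_old_spec : Claim_equal_theLoveLetterMystery_old := by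
  intro s _
  unfold Spec_theLoveLetterMystery_old theLoveLetterMystery_old theLoveLetterMystery_old_alt
  dsimp only
  set cs := s.toList
  set s0 := cs.map Char.toNat with hs0
  have hlen : s0.length = cs.length := by simp [hs0]
  have h := tlmForA_spec s0 s0.length 0 s0 0 rfl (by omega) (fun i _ _ => rfl)
  simp only [Nat.cast_zero, sub_zero] at h
  rw [List.range_eq_range']
  simp only [hlen] at h ⊢
  rw [h, zero_add, tlmSum, hlen, Nat.sub_zero]
  rw [PySem.List.foldl_add]
  rw [zero_add]
  congr 1
  rw [← List.range_eq_range']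
  apply List.map_congr_left
  intro i hi
  have hi2 : i < cs.length / 2 := by
    have := List.mem_range.mp hi; omega
  rw [getD_map_toNat cs i (by omega), getD_map_toNat cs (cs.length - 1 - i) (by omega)]
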